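-- pv_equiv track=rewrite | github.com/rakitaj/daily-programmer | aoc2017/day03.py | generate_spiral_sequence
-- ===== SOURCE A (Python) =====
-- def generate_spiral_sequence(num_terms: int):
--     current, counter = 0, 0
--     number_repeated = False
--     while counter < num_terms:
--         if number_repeated is False:
--             current += 1
--             number_repeated = True
--         else:
--             number_repeated = False
--         counter += 1
--         yield current
-- ===== SOURCE B (Python) =====
-- def generate_spiral_sequence(num_terms: int):
--     for i in range(num_terms):
--         yield i // 2 + 1
-- ===== Notes on version B (the rewrite author's own statement) =====
-- stated objective: simpler
-- what changed: Replaces the current/number_repeated boolean-toggle state machine with a direct closed-form mapping of the loop index to its term, yielding i // 2 + 1 for each i in range(num_terms).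
import Mathlib
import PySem

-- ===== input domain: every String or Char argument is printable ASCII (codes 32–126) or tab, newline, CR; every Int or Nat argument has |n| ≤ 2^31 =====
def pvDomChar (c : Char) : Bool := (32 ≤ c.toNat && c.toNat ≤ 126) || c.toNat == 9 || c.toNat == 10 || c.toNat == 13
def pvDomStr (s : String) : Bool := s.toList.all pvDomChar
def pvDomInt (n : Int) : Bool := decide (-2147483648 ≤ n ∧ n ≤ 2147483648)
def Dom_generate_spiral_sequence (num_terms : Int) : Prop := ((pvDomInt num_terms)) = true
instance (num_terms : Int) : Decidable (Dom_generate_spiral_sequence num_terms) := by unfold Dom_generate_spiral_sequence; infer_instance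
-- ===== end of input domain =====

-- B replaces A's current/number_repeated toggle state machine by the closed-form
-- term i // 2 + 1 computed directly from the loop index (objective: simpler).

-- ===== PORT A =====
-- while counter < num_terms: the remaining iteration count is (num_terms - counter),
-- materialised as the Nat fuel; state = (current, number_repeated).
def pvALoop : Nat → Int → Bool → List Int
  | 0, _, _ => []
  | Nat.succ n, current, number_repeated =>
    match number_repeated with
    | false => (current + 1) :: pvALoop n (current + 1) true
    | true => current :: pvALoop n current false

def generate_spiral_sequence (num_terms : Int) : List Int :=
  pvALoop num_terms.toNat 0 false

-- ===== PORT B =====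
def generate_spiral_sequence_alt (num_terms : Int) : List Int :=
  (PySem.List.pyRange 0 num_terms 1).map (fun i => PySem.Int.floordiv i 2 + 1)

-- ===== PRECONDITION & SPEC =====
def Spec_generate_spiral_sequence (num_terms : Int) (out : List Int) : Prop := out = generate_spiral_sequence_alt num_terms
instance (num_terms : Int) (out : List Int) : Decidable (Spec_generate_spiral_sequence num_terms out) := by unfold Spec_generate_spiral_sequence; infer_instance

-- ===== CLAIM (what is proved, stated in full; the proofs are below) =====
def Claim_equal_generate_spiral_sequence : Prop := ∀ (num_terms : Int), Dom_generate_spiral_sequence num_terms → Spec_generate_spiral_sequence num_terms (generate_spiral_sequence num_terms)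

-- ===== LEMMAS AND PROOFS =====

-- Closed form of A's loop from either parity of the toggle.
theorem pvALoop_closed (k : Nat) : ∀ c : Int,
    pvALoop k c false = (List.range k).map (fun i => c + 1 + ((i / 2 : Nat) : Int)) ∧
    pvALoop k c true = (List.range k).map (fun i => c + (((i + 1) / 2 : Nat) : Int)) := by
  induction k with
  | zero => intro c; simp [pvALoop]
  | succ n ih =>
    intro c
    refine ⟨?_, ?_⟩
    · rw [List.range_succ_eq_map]
      simp only [pvALoop, List.map_cons, List.map_map, (ih (c + 1)).2]
      refine List.cons_eq_cons.mpr ⟨by norm_num, List.map_congr_left ?_⟩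
      intro i _
      simp only [Function.comp_apply]
      try push_cast
      try omega
    · rw [List.range_succ_eq_map]
      simp only [pvALoop, List.map_cons, List.map_map, (ih c).1]
      refine List.cons_eq_cons.mpr ⟨by norm_num, List.map_congr_left ?_⟩
      intro i _
      simp only [Function.comp_apply]
      try push_cast
      try omega

-- ===== VERDICT (by name: the statement is the Claim_ definition above) =====
theorem generate_spiral_sequence_spec : Claim_equal_generate_spiral_sequence := by
  intro n _
  unfold Spec_generate_spiral_sequence generate_spiral_sequence generate_spiral_sequence_alt
  rw [(pvALoop_closed n.toNat 0).1, PySem.List.pyRange_one, List.map_map]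
  simp only [sub_zero]
  apply List.map_congr_left
  intro i _
  have h : PySem.Int.floordiv (i : Int) 2 = ((i / 2 : Nat) : Int) := by
    exact_mod_cast PySem.Int.floordiv_natCast i 2
  simp only [Function.comp, zero_add, h]
  omega
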